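-- pv_equiv track=rewrite | github.com/Tibor-V/PKS-FIIT-STU | Zadanie 1/novy.py | formatHexadec
-- ===== SOURCE A (Python) =====
-- def formatHexadec(paket):
--     i = 0
--     byty_v_riadku = 0
--     novy_string = ""
--     while i < len(paket):
--         if byty_v_riadku == 8:
--             novy_string += "  "
--         if byty_v_riadku == 16:
--             byty_v_riadku = 0
--             novy_string += "\n"
--         novy_string += (str(paket[i:i + 2]))
--         novy_string += " "
--         i += 2
--         byty_v_riadku += 1
--     return novy_string
-- ===== SOURCE B (Python) =====
-- def formatHexadec(paket):
--     chunks = [paket[i:i + 2] for i in range(0, len(paket), 2)]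
--     rows = [chunks[r:r + 16] for r in range(0, len(chunks), 16)]
--     lines = []
--     for row in rows:
--         line = "".join(str(b) + " " for b in row[:8])
--         if len(row) > 8:
--             line += "  " + "".join(str(b) + " " for b in row[8:])
--         lines.append(line)
--     return "\n".join(lines)
-- ===== Notes on version B (the rewrite author's own statement) =====
-- stated objective: faster
-- what changed: A's single while-loop that grows one string with repeated += and a running per-row byte counter is replaced by chunking the string into 2-char pieces, grouping them into rows of 16, formatting each row (first 8 bytes, the extra gap, the rest) and joining the rows with newlines.
import Mathlib
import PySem

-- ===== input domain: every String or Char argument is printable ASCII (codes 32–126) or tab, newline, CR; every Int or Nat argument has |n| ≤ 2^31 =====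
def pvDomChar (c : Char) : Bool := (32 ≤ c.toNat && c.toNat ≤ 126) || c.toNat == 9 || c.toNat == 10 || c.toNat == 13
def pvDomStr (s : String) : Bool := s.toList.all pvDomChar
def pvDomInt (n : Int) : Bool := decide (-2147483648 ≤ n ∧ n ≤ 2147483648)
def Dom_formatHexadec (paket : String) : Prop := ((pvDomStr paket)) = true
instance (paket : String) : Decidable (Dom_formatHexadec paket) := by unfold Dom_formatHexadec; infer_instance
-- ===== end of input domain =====

-- B builds the list of 2-char chunks and the rows of 16 up front and joins the formatted rows,
-- instead of A's single while-loop with a running per-row byte counter (objective: alternative decomposition).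

-- ===== PORT A =====
-- literal port of A's while loop; state = (i, byty_v_riadku, novy_string)
def formatHexadecLoop (paket : String) (i : Int) (b : Int) (acc : String) : String :=
  if _h : i < PySem.Str.len paket then
    let acc1 := if b == 8 then acc ++ "  " else acc
    let b2 := if b == 16 then (0 : Int) else b
    let acc2 := if b == 16 then acc1 ++ "\n" else acc1
    let acc3 := acc2 ++ PySem.Str.slice paket (some i) (some (i + 2)) ++ " "
    formatHexadecLoop paket (i + 2) (b2 + 1) acc3
  else acc
termination_by (PySem.Str.len paket - i).toNat
decreasing_by simp only [PySem.Str.len_eq] at *; omega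

def formatHexadec (paket : String) : String :=
  formatHexadecLoop paket 0 0 ""

-- ===== PORT B =====
-- formats one row of at most 16 chunks (the body of Source B's per-row loop)
def pvFmtLine (row : List String) : String :=
  let line := PySem.Str.join "" ((PySem.List.slice row none (some 8)).map (fun c => c ++ " "))
  if 8 < row.length then
    line ++ "  " ++ PySem.Str.join "" ((PySem.List.slice row (some 8) none).map (fun c => c ++ " "))
  else line

def formatHexadec_alt (paket : String) : String :=
  let chunks := (PySem.List.pyRange 0 (PySem.Str.len paket) 2).map
      (fun i => PySem.Str.slice paket (some i) (some (i + 2)))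
  let rows := (PySem.List.pyRange 0 ((chunks.length : Int)) 16).map
      (fun r => PySem.List.slice chunks (some r) (some (r + 16)))
  PySem.Str.join "\n" (rows.map pvFmtLine)

-- ===== PRECONDITION & SPEC =====
def Spec_formatHexadec (paket : String) (out : String) : Prop := out = formatHexadec_alt paket
instance (paket : String) (out : String) : Decidable (Spec_formatHexadec paket out) := by unfold Spec_formatHexadec; infer_instance

-- ===== CLAIM (what is proved, stated in full; the proofs are below) =====
def Claim_equal_formatHexadec : Prop := ∀ (paket : String), Dom_formatHexadec paket → Spec_formatHexadec paket (formatHexadec paket)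

-- ===== LEMMAS AND PROOFS =====

lemma pvPyRange_nil (a b s : Int) (hs : 0 < s) (hab : b ≤ a) :
    PySem.List.pyRange a b s = [] := by
  rw [PySem.List.pyRange_of_pos _ _ hs, if_neg (by omega)]
  simp

lemma pvPyRange_cons (a b s : Int) (hs : 0 < s) (hab : a < b) :
    PySem.List.pyRange a b s = a :: PySem.List.pyRange (a + s) b s := by
  rw [PySem.List.pyRange_of_pos _ _ hs, PySem.List.pyRange_of_pos _ _ hs, if_pos hab]
  have key : (b - a + s - 1) / s = (b - (a + s) + s - 1) / s + 1 := by
    have h1 : b - a + s - 1 = (b - (a + s) + s - 1) + 1 * s := by ring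
    rw [h1, Int.add_mul_ediv_right _ _ (by omega)]
  by_cases h2 : a + s < b
  · rw [if_pos h2, key]
    have hnn : 0 ≤ (b - (a + s) + s - 1) / s := Int.ediv_nonneg (by omega) (by omega)
    have : ((b - (a + s) + s - 1) / s + 1).toNat = ((b - (a + s) + s - 1) / s).toNat + 1 := by omega
    rw [this, List.range_succ_eq_map]
    simp [List.map_map, Function.comp]
    intro k _; ring
  · rw [if_neg h2]
    have : (b - a + s - 1) / s = 1 := by
      rw [key]
      have : (b - (a + s) + s - 1) / s = 0 := by
        apply Int.ediv_eq_zero_of_lt <;> omega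
      omega
    rw [this]
    simp

def pvChunk (s : Nat) : List α → List (List α)
  | [] => []
  | x :: l => ((x :: l).take (s + 1)) :: pvChunk s ((x :: l).drop (s + 1))
termination_by l => l.length
decreasing_by simp

lemma pvChunk_cons (s : Nat) (l : List α) (h : l ≠ []) :
    pvChunk s l = l.take (s + 1) :: pvChunk s (l.drop (s + 1)) := by
  cases l with
  | nil => exact absurd rfl h
  | cons x t => rw [pvChunk.eq_def]

lemma pvChunk_eq_nil_iff (s : Nat) (l : List α) : pvChunk s l = [] ↔ l = [] := by
  cases l with
  | nil => rw [pvChunk.eq_def]; simp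
  | cons x t => rw [pvChunk_cons s _ (by simp)]; simp

lemma pvChunk_map {α β : Type} (s : Nat) (f : α → β) (l : List α) :
    pvChunk s (l.map f) = (pvChunk s l).map (List.map f) := by
  induction hn : l.length using Nat.strong_induction_on generalizing l with
  | _ n ih =>
    cases l with
    | nil => simp [pvChunk]
    | cons x t =>
      rw [pvChunk_cons s ((x :: t).map f) (by simp), pvChunk_cons s (x :: t) (by simp)]
      refine congrArg₂ List.cons ?_ ?_
      · simp [List.map_take]
      · have hd : (List.map f (x :: t)).drop (s + 1) = List.map f ((x :: t).drop (s + 1)) := by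
          simp [List.map_drop]
        rw [hd]
        subst hn
        exact ih ((x :: t).drop (s + 1)).length (by simp) _ rfl

lemma pvMap_slice_pyRange {α : Type} (xs : List α) (s : Nat) (j : Nat) :
    ((PySem.List.pyRange (j : Int) ((xs.length : Int)) ((s : Int) + 1)).map
        (fun i => PySem.List.slice xs (some i) (some (i + ((s : Int) + 1)))))
      = pvChunk s (xs.drop j) := by
  induction hn : xs.length - j using Nat.strong_induction_on generalizing j with
  | _ n ih =>
    by_cases h : j < xs.length
    · rw [pvPyRange_cons _ _ _ (by omega) (by exact_mod_cast h), List.map_cons]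
      have hcast : ((s : Int) + 1) = ((s + 1 : Nat) : Int) := by push_cast; ring
      have hhead : PySem.List.slice xs (some (j : Int)) (some ((j : Int) + ((s : Int) + 1)))
          = (xs.drop j).take (s + 1) := by
        rw [hcast]; exact PySem.List.slice_natCast_add xs j (s + 1)
      have hj2 : ((j : Int) + ((s : Int) + 1)) = ((j + (s + 1) : Nat) : Int) := by push_cast; ring
      rw [hhead, hj2, ih (xs.length - (j + (s + 1))) (by omega) _ rfl,
        pvChunk_cons s (xs.drop j) (by simp; omega)]
      rw [List.drop_drop]
    · rw [pvPyRange_nil _ _ _ (by omega) (by exact_mod_cast (by omega : xs.length ≤ j))]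
      rw [List.drop_eq_nil_of_le (by omega)]
      simp [pvChunk]

def pvG : List (List Char) → Int → List Char
  | [], _ => []
  | c :: l, b =>
    (if b == 8 then [' ', ' '] else []) ++ (if b == 16 then ['\n'] else []) ++
      c ++ ' ' :: pvG l ((if b == 16 then 0 else b) + 1)

def pvJJ (l : List (List Char)) : List Char := (l.map (fun c => c ++ [' '])).flatten


lemma pvJJ_cons (c : List Char) (l : List (List Char)) :
    pvJJ (c :: l) = c ++ ' ' :: pvJJ l := by simp [pvJJ]

lemma pvJJ_eq_join (l : List (List Char)) :
    pvJJ l = PySem.Chars.join [] (l.map (fun c => c ++ [' '])) := by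
  induction l with
  | nil => simp [pvJJ, PySem.Chars.join_nil]
  | cons c t ih =>
    cases t with
    | nil => rw [pvJJ_cons, List.map_cons, List.map_nil, PySem.Chars.join_singleton]; rfl
    | cons d u =>
      rw [pvJJ_cons, List.map_cons, List.map_cons, PySem.Chars.join_cons_cons, ih]
      simp

lemma pvG_run8 (k : Nat) (b : Int) (l : List (List Char)) (hk : b + k = 8) (hb : 0 ≤ b) :
    pvG l b = pvJJ (l.take k) ++ (if l.length ≤ k then [] else pvG (l.drop k) 8) := by
  induction k generalizing b l with
  | zero =>
    have : b = 8 := by omega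
    subst this
    cases l with
    | nil => simp [pvG, pvJJ]
    | cons c t => simp [pvJJ]
  | succ k ih =>
    cases l with
    | nil => simp [pvG, pvJJ]
    | cons c t =>
      have h8 : (b == 8) = false := by simp; omega
      have h16 : (b == 16) = false := by simp; omega
      rw [pvG, h8, h16]
      simp only [Bool.false_eq_true, if_false, List.nil_append, List.take_succ_cons, pvJJ_cons,
        List.drop_succ_cons, List.length_cons, Nat.add_le_add_iff_right]
      rw [ih (b + 1) t (by omega) (by omega)]
      simp

lemma pvG_run16 (k : Nat) (b : Int) (l : List (List Char)) (hk : b + k = 16) (hb : 9 ≤ b) :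
    pvG l b = pvJJ (l.take k) ++ (if l.length ≤ k then [] else pvG (l.drop k) 16) := by
  induction k generalizing b l with
  | zero =>
    have : b = 16 := by omega
    subst this
    cases l with
    | nil => simp [pvG, pvJJ]
    | cons c t => simp [pvJJ]
  | succ k ih =>
    cases l with
    | nil => simp [pvG, pvJJ]
    | cons c t =>
      have h8 : (b == 8) = false := by simp; omega
      have h16 : (b == 16) = false := by simp; omega
      rw [pvG, h8, h16]
      simp only [Bool.false_eq_true, if_false, List.nil_append, List.take_succ_cons, pvJJ_cons,
        List.drop_succ_cons, List.length_cons, Nat.add_le_add_iff_right]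
      rw [ih (b + 1) t (by omega) (by omega)]
      simp

lemma pvG_eight (l : List (List Char)) (h : l ≠ []) :
    pvG l 8 = ' ' :: ' ' :: (pvJJ (l.take 8) ++ (if l.length ≤ 8 then [] else pvG (l.drop 8) 16)) := by
  cases l with
  | nil => exact absurd rfl h
  | cons c t =>
    rw [pvG]
    norm_num
    rw [pvG_run16 7 9 t (by norm_num) (by norm_num)]
    simp [pvJJ_cons]
    congr 1
    simp [Nat.lt_succ_iff]

lemma pvG_sixteen' (l : List (List Char)) (h : l ≠ []) :
    pvG l 16 = '\n' :: pvG l 0 := by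
  cases l with
  | nil => exact absurd rfl h
  | cons c t => simp [pvG]

def pvFmtRow (row : List (List Char)) : List Char :=
  pvJJ (row.take 8) ++ (if 8 < row.length then ' ' :: ' ' :: pvJJ (row.drop 8) else [])

def pvF (l : List (List Char)) : List Char :=
  PySem.Chars.join ['\n'] ((pvChunk 15 l).map pvFmtRow)

lemma pvF_nil : pvF [] = [] := by
  rw [pvF, pvChunk.eq_def]; simp [PySem.Chars.join_nil]

lemma pvF_cons (l : List (List Char)) (h : l ≠ []) :
    pvF l = pvFmtRow (l.take 16) ++ (if l.drop 16 = [] then [] else '\n' :: pvF (l.drop 16)) := by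
  rw [pvF, pvChunk_cons 15 l h]
  simp only [Nat.reduceAdd, List.map_cons]
  by_cases hd : l.drop 16 = []
  · rw [hd, if_pos rfl]
    have : pvChunk 15 ([] : List (List Char)) = [] := by rw [pvChunk.eq_def]
    rw [this]
    simp [PySem.Chars.join_singleton]
  · obtain ⟨r, rest, hr⟩ : ∃ r rest, pvChunk 15 (l.drop 16) = r :: rest := by
      cases hc : pvChunk 15 (l.drop 16) with
      | nil => exact absurd ((pvChunk_eq_nil_iff 15 _).mp hc) hd
      | cons a b => exact ⟨a, b, rfl⟩
    rw [hr, if_neg hd, List.map_cons, PySem.Chars.join_cons_cons, pvF, hr]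
    simp

lemma pvG_eq_pvF (l : List (List Char)) : pvG l 0 = pvF l := by
  induction hn : l.length using Nat.strong_induction_on generalizing l with
  | _ n ih =>
    cases l with
    | nil => rw [pvF_nil]; rfl
    | cons c t =>
      have hne : c :: t ≠ [] := by simp
      rw [pvG_run8 8 0 (c :: t) (by norm_num) (by norm_num), pvF_cons (c :: t) hne]
      generalize hl : c :: t = l at *
      have hlen : 0 < l.length := by subst hl; simp
      by_cases h8 : l.length ≤ 8
      · rw [if_pos h8]
        have ht16 : l.take 16 = l := List.take_of_length_le (by omega)
        have hd16 : l.drop 16 = [] := List.drop_eq_nil_of_le (by omega)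
        rw [ht16, hd16, if_pos rfl, pvFmtRow, if_neg (by omega : ¬ 8 < l.length)]
        simp
      · rw [if_neg h8]
        have hd8 : l.drop 8 ≠ [] := by
          intro hc; rw [List.drop_eq_nil_iff] at hc; omega
        rw [pvG_eight _ hd8]
        have htt : (l.take 16).take 8 = l.take 8 := by
          simp [List.take_take]
        have hdt : (l.take 16).drop 8 = (l.drop 8).take 8 := by
          rw [List.drop_take]
        have hdd : (l.drop 8).drop 8 = l.drop 16 := by
          rw [List.drop_drop]
        have hc2 : 8 < (l.take 16).length := by rw [List.length_take]; omega
        rw [pvFmtRow, htt, hdt, if_pos hc2]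
        by_cases h16 : l.length ≤ 16
        · have hd16 : l.drop 16 = [] := List.drop_eq_nil_of_le (by omega)
          have hc3 : (l.drop 8).length ≤ 8 := by rw [List.length_drop]; omega
          rw [hd16, if_pos rfl, if_pos hc3]
          simp
        · have hd16 : l.drop 16 ≠ [] := by
            intro hc; rw [List.drop_eq_nil_iff] at hc; omega
          have hc4 : ¬ (l.drop 8).length ≤ 8 := by rw [List.length_drop]; omega
          rw [if_neg hd16, if_neg hc4, hdd, pvG_sixteen' _ hd16,
            ih (l.drop 16).length (by rw [List.length_drop]; omega) _ rfl]
          simp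

lemma pvLoop_eq (paket : String) (n : Nat) :
    ∀ (i b : Int) (acc : String), 0 ≤ i → paket.toList.length ≤ i.toNat + n →
    (formatHexadecLoop paket i b acc).toList
      = acc.toList ++ pvG (pvChunk 1 (paket.toList.drop i.toNat)) b := by
  induction n with
  | zero =>
    intro i b acc hi hn
    rw [formatHexadecLoop, dif_neg (by rw [PySem.Str.len_eq]; omega),
      List.drop_eq_nil_of_le (by omega), pvChunk.eq_def]
    simp [pvG]
  | succ n ih =>
    intro i b acc hi hn
    by_cases h : i < PySem.Str.len paket
    · have hlen : i.toNat < paket.toList.length := by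
        rw [PySem.Str.len_eq] at h; omega
      rw [formatHexadecLoop, dif_pos h]
      rw [ih (i + 2) _ _ (by omega) (by omega)]
      have hchunk : (PySem.Str.slice paket (some i) (some (i + 2))).toList
          = (paket.toList.drop i.toNat).take 2 := by
        rw [PySem.Str.toList_slice, PySem.Chars.slice_eq_listSlice,
          PySem.List.slice_toNat paket.toList (a := i) (b := i + 2) (by omega) (by omega)]
        congr 1
        omega
      have hdrop : paket.toList.drop (i + 2).toNat = (paket.toList.drop i.toNat).drop 2 := by
        rw [List.drop_drop]
        congr 1
        omega
      rw [hdrop, pvChunk_cons 1 (paket.toList.drop i.toNat) (by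
        intro hc; rw [List.drop_eq_nil_iff] at hc; omega)]
      by_cases hb8 : b = 8
      · subst hb8
        simp [pvG, String.toList_append, hchunk]
      · by_cases hb16 : b = 16
        · subst hb16
          simp [pvG, String.toList_append, hchunk]
        · have e8 : (b == 8) = false := by simp [hb8]
          have e16 : (b == 16) = false := by simp [hb16]
          rw [pvG, e8, e16]
          simp [String.toList_append, hchunk]
    · rw [formatHexadecLoop, dif_neg h]
      rw [PySem.Str.len_eq] at h
      rw [List.drop_eq_nil_of_le (by omega), pvChunk.eq_def]
      simp [pvG]

lemma pvFmtLine_toList (row : List String) :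
    (pvFmtLine row).toList = pvFmtRow (row.map String.toList) := by
  have hto : PySem.List.slice row none (some 8) = row.take 8 := by
    simpa using PySem.List.slice_to_natCast row 8
  have hfrom : PySem.List.slice row (some 8) none = row.drop 8 := by
    simpa using PySem.List.slice_from_natCast row 8
  have hsp : (" " : String).toList = [' '] := rfl
  have hsp2 : ("  " : String).toList = [' ', ' '] := rfl
  have hcomp : (String.toList ∘ fun c : String => c ++ " ")
      = ((fun c => c ++ [' ']) ∘ String.toList) := by
    funext c; simp [String.toList_append, hsp]
  rw [pvFmtLine, pvFmtRow, hto, hfrom]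
  by_cases h : 8 < row.length
  · rw [if_pos h, if_pos (by simpa using h)]
    simp [String.toList_append, pvJJ_eq_join, List.map_map, hsp2, List.map_take,
      List.map_drop, hcomp]
  · rw [if_neg h, if_neg (by simpa using h)]
    simp [pvJJ_eq_join, List.map_map, List.map_take, hcomp]

lemma pvAlt_toList (paket : String) :
    (formatHexadec_alt paket).toList = pvF (pvChunk 1 paket.toList) := by
  rw [formatHexadec_alt]
  have h1 := pvMap_slice_pyRange paket.toList 1 0
  norm_num at h1
  have hchunks : ((PySem.List.pyRange 0 (PySem.Str.len paket) 2).map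
      (fun i => PySem.Str.slice paket (some i) (some (i + 2)))).map String.toList
      = pvChunk 1 paket.toList := by
    rw [← h1, List.map_map]
    congr 1
    funext i
    simp [Function.comp, PySem.Str.toList_slice]
  set chunks := (PySem.List.pyRange 0 (PySem.Str.len paket) 2).map
      (fun i => PySem.Str.slice paket (some i) (some (i + 2))) with hc
  have h2 := pvMap_slice_pyRange chunks 15 0
  norm_num at h2
  rw [h2, PySem.Str.toList_join]
  have hln : ("\n" : String).toList = ['\n'] := rfl
  rw [hln, pvF, ← hchunks, pvChunk_map 15 String.toList chunks]
  rw [List.map_map, List.map_map]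
  congr 1
  apply List.map_congr_left
  intro r _
  simp only [Function.comp_apply, pvFmtLine_toList]

-- ===== VERDICT (by name: the statement is the Claim_ definition above) =====
theorem formatHexadec_spec : Claim_equal_formatHexadec := by
  intro paket _
  unfold Spec_formatHexadec
  apply String.toList_inj.mp
  rw [pvAlt_toList]
  have h := pvLoop_eq paket paket.toList.length 0 0 "" (le_refl 0) (by simp)
  rw [formatHexadec, h]
  simpa using pvG_eq_pvF (pvChunk 1 paket.toList)
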